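-- pv_equiv track=rewrite | github.com/fschatbot/Advent-Calendar-Python | 2017/16.py | part2
-- ===== SOURCE A (Python) =====
-- def part2(data):
-- 	dance = [program for program in 'abcdefghijklmnop']
-- 	seen = []
--
-- 	for i in range(1_000_000_000):
-- 		# Skipping if we have already done this dance
-- 		if ''.join(dance) in seen:
-- 			return ''.join(seen[1_000_000_000 % i])
-- 		else:
-- 			seen.append(''.join(dance))
--
-- 		# Doing the entire dance
-- 		for movement in data:
-- 			if movement[0] == 's':
-- 				spinCount = int(movement[1:])
-- 				dance = dance[-spinCount:] + dance[:-spinCount]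
-- 			elif movement[0] == 'x':
-- 				p1, p2 = map(int, movement[1:].split('/'))
-- 				dance[p2], dance[p1] = dance[p1], dance[p2]
-- 			elif movement[0] == 'p':
-- 				p1, p2 = map(dance.index, movement[1:].split('/'))
-- 				dance[p2], dance[p1] = dance[p1], dance[p2]
--
-- 	return ''.join(dance)
-- ===== SOURCE B (Python) =====
-- def part2(data):
--     # Parse the move list ONCE into op tuples (A re-parses every string on
--     # every one of the up-to-10^9 dances), then find the cycle by comparing
--     # with the starting arrangement (the dance is a bijection, so the first
--     # repeated state is the start) instead of keeping a list of every state
--     # and scanning it each round; finally replay 10**9 % cycle dances.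
--     ops = []
--     for m in data:
--         if m[0] == 's':
--             ops.append(('s', int(m[1:])))
--         elif m[0] == 'x':
--             i, j = map(int, m[1:].split('/'))
--             ops.append(('x', i, j))
--         elif m[0] == 'p':
--             a, b = m[1:].split('/')
--             ops.append(('p', a, b))
--
--     def dance(s):
--         for op in ops:
--             if op[0] == 's':
--                 k = op[1]
--                 s = s[-k:] + s[:-k]
--             elif op[0] == 'x':
--                 _, i, j = op
--                 s = s[:]
--                 s[j], s[i] = s[i], s[j]
--             else:
--                 _, a, b = op
--                 i, j = s.index(a), s.index(b)
--                 s = s[:]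
--                 s[j], s[i] = s[i], s[j]
--         return s
--
--     start = list('abcdefghijklmnop')
--     state = start
--     for i in range(1, 1_000_000_001):
--         state = dance(state)
--         if state == start:
--             for _ in range(1_000_000_000 % i):
--                 state = dance(state)
--             return ''.join(state)
--     return ''.join(state)
-- ===== Notes on version B (the rewrite author's own statement) =====
-- stated objective: alternative
-- what changed: B parses the move list once into op tuples and detects the cycle by comparing the state with the starting arrangement only (the dance is a bijection, so the first repeated state is the start), then replays 10**9 % cycle dances, instead of A's keeping a list of every seen arrangement, re-joining and linearly scanning it every iteration and re-parsing every move string on every dance.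
import Mathlib
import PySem

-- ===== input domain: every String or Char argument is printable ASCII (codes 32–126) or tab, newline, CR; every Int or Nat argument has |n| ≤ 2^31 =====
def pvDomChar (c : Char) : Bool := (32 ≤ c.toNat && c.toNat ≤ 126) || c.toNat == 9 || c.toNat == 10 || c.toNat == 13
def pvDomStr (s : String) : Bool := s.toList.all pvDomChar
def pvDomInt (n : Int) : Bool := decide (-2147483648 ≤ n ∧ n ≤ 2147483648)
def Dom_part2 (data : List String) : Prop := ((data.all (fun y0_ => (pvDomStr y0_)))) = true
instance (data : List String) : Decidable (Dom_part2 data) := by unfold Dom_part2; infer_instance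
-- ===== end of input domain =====

-- B replaces A's seen-list cycle detection (a linear membership scan per dance, re-parsing
-- every move string on every dance) by: parse the moves once, detect the cycle by comparing
-- with the starting arrangement only (the dance is a bijection), then replay 10^9 % cycle dances.

-- ===== PORT A =====

-- [program for program in 'abcdefghijklmnop']  (a list of one-character strings)
def pvStart : List String := ("abcdefghijklmnop".toList).map (fun c => String.ofList [c])

-- one iteration of A's inner `for movement in data` loop body
def part2Move (dance : List String) (movement : String) : List String :=
  if PySem.Str.pyGet? movement 0 = some 's' then
    -- spinCount = int(movement[1:]); Pre_ guarantees the parse succeeds (else Python raises ValueError)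
    let k := (PySem.Int.ofStr? (PySem.Str.slice movement (some 1) none)).getD 0
    -- dance[-spinCount:] + dance[:-spinCount]
    PySem.List.slice dance (some (-k)) none ++ PySem.List.slice dance none (some (-k))
  else if PySem.Str.pyGet? movement 0 = some 'x' then
    match (PySem.Str.split? (PySem.Str.slice movement (some 1) none) "/").getD [] with
    | [s1, s2] =>
      let p1 := (PySem.Int.ofStr? s1).getD 0   -- Pre_: both parse and are in range (else ValueError/IndexError)
      let p2 := (PySem.Int.ofStr? s2).getD 0
      -- dance[p2], dance[p1] = dance[p1], dance[p2]
      PySem.List.pySetD (PySem.List.pySetD dance p2 (PySem.List.pyGetD dance p1 "")) p1 (PySem.List.pyGetD dance p2 "")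
    | _ => dance   -- tuple unpack of ≠ 2 pieces raises ValueError: outside Pre_
  else if PySem.Str.pyGet? movement 0 = some 'p' then
    match (PySem.Str.split? (PySem.Str.slice movement (some 1) none) "/").getD [] with
    | [s1, s2] =>
      -- p1, p2 = map(dance.index, …); Pre_ guarantees both pieces occur in dance (else ValueError)
      let p1 := (PySem.List.index? dance s1).getD 0
      let p2 := (PySem.List.index? dance s2).getD 0
      PySem.List.pySetD (PySem.List.pySetD dance (p2 : Int) (PySem.List.pyGetD dance (p1 : Int) "")) (p1 : Int) (PySem.List.pyGetD dance (p2 : Int) "")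
    | _ => dance   -- outside Pre_
  else dance

-- A's outer `for i in range(1_000_000_000)` loop: fuel = remaining iterations, i = loop index
def part2Go (data : List String) (dance seen : List String) (i : Nat) : Nat → String
  | 0 => PySem.Str.join "" dance
  | fuel + 1 =>
    if PySem.Str.join "" dance ∈ seen then
      -- ''.join(seen[10^9 % i]): ''.join of a string is that string; the index is < seen.length
      -- whenever this branch is reached (i = seen.length, 10^9 % i < i), so getD's default is dead
      (PySem.List.pyGet? seen (PySem.Int.mod 1000000000 (i : Int))).getD ""
    else
      part2Go data (data.foldl part2Move dance) (seen ++ [PySem.Str.join "" dance]) (i + 1) fuel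

def part2 (data : List String) : String :=
  part2Go data pvStart [] 0 1000000000

-- ===== PORT B =====

-- B's parsed move tuples ('s',k) / ('x',i,j) / ('p',a,b)
inductive PvOp where
  | spin (k : Int)
  | exch (i j : Int)
  | part (a b : String)
deriving DecidableEq, Repr

-- the 0-or-1 ops B's parse loop appends for one string m
def pvParseMove (m : String) : List PvOp :=
  if PySem.Str.pyGet? m 0 = some 's' then
    [.spin ((PySem.Int.ofStr? (PySem.Str.slice m (some 1) none)).getD 0)]
  else if PySem.Str.pyGet? m 0 = some 'x' then
    match (PySem.Str.split? (PySem.Str.slice m (some 1) none) "/").getD [] with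
    | [s1, s2] => [.exch ((PySem.Int.ofStr? s1).getD 0) ((PySem.Int.ofStr? s2).getD 0)]
    | _ => []    -- outside Pre_ (B raises there too)
  else if PySem.Str.pyGet? m 0 = some 'p' then
    match (PySem.Str.split? (PySem.Str.slice m (some 1) none) "/").getD [] with
    | [s1, s2] => [.part s1 s2]
    | _ => []    -- outside Pre_
  else []

-- B's `for m in data: … ops.append(…)` loop
def pvParse (data : List String) : List PvOp :=
  data.foldl (fun acc m => acc ++ pvParseMove m) []

-- one parsed op applied to the state (B's `for op in ops` body)
def pvApply (s : List String) (op : PvOp) : List String :=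
  match op with
  | .spin k =>
    PySem.List.slice s (some (-k)) none ++ PySem.List.slice s none (some (-k))
  | .exch i j =>
    PySem.List.pySetD (PySem.List.pySetD s j (PySem.List.pyGetD s i "")) i (PySem.List.pyGetD s j "")
  | .part a b =>
    let i := (PySem.List.index? s a).getD 0
    let j := (PySem.List.index? s b).getD 0
    PySem.List.pySetD (PySem.List.pySetD s (j : Int) (PySem.List.pyGetD s (i : Int) "")) (i : Int) (PySem.List.pyGetD s (j : Int) "")

-- B's `for _ in range(10**9 % i): state = dance(state)` replay loop
def pvReplay (ops : List PvOp) (s : List String) : Nat → List String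
  | 0 => s
  | n + 1 => pvReplay ops (ops.foldl pvApply s) n

-- B's `for i in range(1, 1_000_000_001)` loop
def part2AltGo (ops : List PvOp) (start state : List String) (i : Nat) : Nat → String
  | 0 => PySem.Str.join "" state
  | fuel + 1 =>
    let s := ops.foldl pvApply state
    if s = start then
      PySem.Str.join "" (pvReplay ops s (1000000000 % i))
    else
      part2AltGo ops start s (i + 1) fuel

def part2_alt (data : List String) : String :=
  part2AltGo (pvParse data) pvStart pvStart 1 1000000000

-- ===== PRECONDITION & SPEC =====

-- Pre_ admits exactly the movement strings A executes without an exception: anything not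
-- starting with 's'/'x'/'p' is skipped by A (admitted, no shape constraint); 's…' needs the
-- int() parse to succeed; 'x…' needs exactly two '/'-pieces, both ints in range for a
-- 16-element list; 'p…' needs exactly two '/'-pieces, both single letters 'a'–'p' (A's
-- dance always holds exactly those, so anything else raises ValueError). Empty strings raise
-- IndexError at movement[0].
def pvValidMove (m : String) : Bool :=
  match PySem.Str.pyGet? m 0 with
  | none => false
  | some c =>
    if c = 's' then (PySem.Int.ofStr? (PySem.Str.slice m (some 1) none)).isSome
    else if c = 'x' then
      match (PySem.Str.split? (PySem.Str.slice m (some 1) none) "/").getD [] with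
      | [s1, s2] =>
        match PySem.Int.ofStr? s1, PySem.Int.ofStr? s2 with
        | some k1, some k2 => decide (-16 ≤ k1 ∧ k1 < 16 ∧ -16 ≤ k2 ∧ k2 < 16)
        | _, _ => false
      | _ => false
    else if c = 'p' then
      match (PySem.Str.split? (PySem.Str.slice m (some 1) none) "/").getD [] with
      | [s1, s2] => pvStart.contains s1 && pvStart.contains s2
      | _ => false
    else true

def Pre_part2 (data : List String) : Prop := ∀ m ∈ data, pvValidMove m = true
instance (data : List String) : Decidable (Pre_part2 data) := by unfold Pre_part2; infer_instance

def pvWitness_part2 : List String := ["s3", "x13/4", "pe/b", "quux"]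

def Spec_part2 (data : List String) (out : String) : Prop := out = part2_alt data
instance (data : List String) (out : String) : Decidable (Spec_part2 data out) := by unfold Spec_part2; infer_instance

-- ===== CLAIM (what is proved, stated in full; the proofs are below) =====
def Claim_equal_part2 : Prop := ∀ (data : List String), Dom_part2 data → Pre_part2 data → Spec_part2 data (part2 data)

-- ===== LEMMAS AND PROOFS =====

theorem pvWitness_ok : Dom_part2 pvWitness_part2 ∧ Pre_part2 pvWitness_part2 := by decide

-- ---------- generic helpers ----------

-- normalized (Python) index for a length-n list
def pvNormIdx (n : Nat) (i : Int) : Nat := if 0 ≤ i then i.toNat else n - (-i).toNat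

theorem pvIdx?_eq_norm (n : Nat) (i : Int) (h1 : -(n:Int) ≤ i) (h2 : i < n) :
    PySem.List.pyIdx? n i = some (pvNormIdx n i) := by
  rw [PySem.List.pyIdx?, pvNormIdx]
  split_ifs with ha <;> rfl

theorem pvNormIdx_lt (n : Nat) (i : Int) (_h0 : 0 < n) (h1 : -(n:Int) ≤ i) (h2 : i < n) :
    pvNormIdx n i < n := by
  simp only [pvNormIdx]; split_ifs <;> omega

theorem pvGetD_norm (s : List String) (i : Int) (h1 : -(s.length:Int) ≤ i) (h2 : i < s.length) :
    PySem.List.pyGetD s i "" = s.getD (pvNormIdx s.length i) "" := by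
  have hlt : pvNormIdx s.length i < s.length := pvNormIdx_lt _ _ (by omega) h1 h2
  simp only [PySem.List.pyGetD, PySem.List.pyGet?, pvIdx?_eq_norm _ _ h1 h2, Option.bind_some]
  rw [List.getD_eq_getElem _ _ hlt, List.getElem?_eq_getElem hlt]
  rfl

theorem pvSetD_norm (s : List String) (i : Int) (v : String)
    (h1 : -(s.length:Int) ≤ i) (h2 : i < s.length) :
    PySem.List.pySetD s i v = s.set (pvNormIdx s.length i) v := by
  simp only [PySem.List.pySetD, PySem.List.pySet?, pvIdx?_eq_norm _ _ h1 h2, Option.map_some,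
    Option.getD_some]

-- the double-set position swap both ports perform
def pvSw (s : List String) (u v : Nat) : List String :=
  (s.set v (s.getD u "")).set u (s.getD v "")

@[simp] theorem pvSw_length (s : List String) (u v : Nat) : (pvSw s u v).length = s.length := by
  simp [pvSw]

theorem pvSw_getElem (s : List String) (u v k : Nat) (hu : u < s.length) (hv : v < s.length)
    (hk : k < s.length) :
    (pvSw s u v)[k]'(by simpa using hk) = if k = u then s[v] else if k = v then s[u] else s[k] := by
  simp only [pvSw, List.getD_eq_getElem _ _ hu, List.getD_eq_getElem _ _ hv]
  rw [List.getElem_set (by simpa using hk), List.getElem_set (by simpa using hk)]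
  by_cases h1 : k = u <;> by_cases h2 : k = v <;> simp_all [eq_comm]

theorem pvSw_count (s : List String) (u v : Nat) (hu : u < s.length) (hv : v < s.length)
    (c : String) : List.count c (pvSw s u v) = List.count c s := by
  have hu' : s[u] ∈ s := List.getElem_mem hu
  have hv' : s[v] ∈ s := List.getElem_mem hv
  have hcu : s[u] = c → 0 < List.count c s := fun h => List.count_pos_iff.mpr (h ▸ hu')
  have hcv : s[v] = c → 0 < List.count c s := fun h => List.count_pos_iff.mpr (h ▸ hv')
  simp only [pvSw, List.getD_eq_getElem _ _ hu, List.getD_eq_getElem _ _ hv]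
  rw [List.count_set (by simpa using hu), List.count_set hv]
  rw [List.getElem_set (by simpa using hu)]
  by_cases h1 : s[u] = c <;> by_cases h2 : s[v] = c <;>
    by_cases h3 : v = u <;> simp_all

theorem pvSw_perm (s : List String) (u v : Nat) (hu : u < s.length) (hv : v < s.length) :
    (pvSw s u v).Perm s :=
  List.perm_iff_count.mpr (fun c => pvSw_count s u v hu hv c)

theorem pvSw_pvSw (s : List String) (u v : Nat) (hu : u < s.length) (hv : v < s.length) :
    pvSw (pvSw s u v) u v = s := by
  have hu' : u < (pvSw s u v).length := by simpa using hu
  have hv' : v < (pvSw s u v).length := by simpa using hv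
  apply List.ext_getElem (by simp)
  intro k hk hk'
  rw [pvSw_getElem _ u v k (by simpa using hu) (by simpa using hv) (by simpa using hk)]
  rw [pvSw_getElem _ u v u (by simpa using hu) (by simpa using hv) (by simpa using hu),
    pvSw_getElem _ u v v (by simpa using hu) (by simpa using hv) (by simpa using hv)]
  rw [pvSw_getElem _ u v k (by simpa using hu) (by simpa using hv) (by simpa using hk')]
  by_cases h1 : k = u <;> by_cases h2 : k = v <;> simp_all

-- rotations (what a spin move does)
theorem pvRot_perm (s : List String) (m : Nat) : (s.drop m ++ s.take m).Perm s := by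
  calc (s.drop m ++ s.take m).Perm (s.take m ++ s.drop m) := List.perm_append_comm
    _ = s := List.take_append_drop m s

theorem pvRot_inj (s t : List String) (m : Nat) (hlen : s.length = t.length)
    (h : s.drop m ++ s.take m = t.drop m ++ t.take m) : s = t := by
  by_cases hm : s.length ≤ m
  · rw [List.drop_eq_nil_of_le hm, List.take_of_length_le hm,
      List.drop_eq_nil_of_le (hlen ▸ hm), List.take_of_length_le (hlen ▸ hm)] at h
    simpa using h
  · have hlen2 : (s.drop m).length = (t.drop m).length := by simp [hlen]
    obtain ⟨h1, h2⟩ := List.append_inj h hlen2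
    calc s = s.take m ++ s.drop m := (List.take_append_drop m s).symm
      _ = t.take m ++ t.drop m := by rw [h1, h2]
      _ = t := List.take_append_drop m t


-- ---------- per-op characterization on good states ----------

-- the states A's dance can be in: permutations of the initial arrangement
def pvGood (s : List String) : Prop := s.Perm pvStart

theorem pvStart_nodup : pvStart.Nodup := by decide
theorem pvStart_length : pvStart.length = 16 := by decide

theorem pvGood_length {s : List String} (h : pvGood s) : s.length = 16 :=
  h.length_eq.trans pvStart_length

theorem pvGood_nodup {s : List String} (h : pvGood s) : s.Nodup :=
  h.symm.nodup pvStart_nodup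

theorem pvGood_mem {s : List String} (h : pvGood s) {a : String} (ha : a ∈ pvStart) : a ∈ s :=
  (h.mem_iff).mpr ha

-- which ops Pre_ lets through
def pvValidOp : PvOp → Prop
  | .spin _ => True
  | .exch i j => -16 ≤ i ∧ i < 16 ∧ -16 ≤ j ∧ j < 16
  | .part a b => a ∈ pvStart ∧ b ∈ pvStart

-- spin
def pvAmt (n : Nat) (k : Int) : Nat := if 0 < k then n - k.toNat else (-k).toNat

theorem spin_eq (s : List String) (k : Int) :
    pvApply s (.spin k) = s.drop (pvAmt s.length k) ++ s.take (pvAmt s.length k) := by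
  simp only [pvApply, pvAmt]
  by_cases hk : 0 < k
  · have h1 : -k = -((k.toNat : Nat) : Int) := by omega
    rw [if_pos hk, h1, PySem.List.slice_from_neg_natCast s k.toNat (by omega),
      PySem.List.slice_to_neg_natCast s k.toNat (by omega)]
  · have h0 : (0:Int) ≤ -k := by omega
    rw [if_neg hk, PySem.List.slice_from s h0, PySem.List.slice_to s h0]

-- exchange
theorem exch_eq (s : List String) (i j : Int) (hlen : s.length = 16)
    (hv : pvValidOp (.exch i j)) :
    pvApply s (.exch i j) = pvSw s (pvNormIdx 16 i) (pvNormIdx 16 j) := by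
  obtain ⟨h1, h2, h3, h4⟩ := hv
  have hi1 : -(s.length:Int) ≤ i := by omega
  have hi2 : i < s.length := by omega
  have hj1 : -(s.length:Int) ≤ j := by omega
  have hj2 : j < s.length := by omega
  have hsetlen : (s.set (pvNormIdx s.length j) (s.getD (pvNormIdx s.length i) "")).length
      = s.length := by simp
  simp only [pvApply]
  rw [pvGetD_norm s i hi1 hi2, pvGetD_norm s j hj1 hj2,
    pvSetD_norm s j _ hj1 hj2]
  rw [pvSetD_norm _ i _ (by rw [hsetlen]; exact hi1) (by rw [hsetlen]; exact hi2)]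
  simp only [pvSw, List.length_set, hlen]

-- partner:  it acts as the value substitution swapping letters a and b
def pvSwF (a b x : String) : String := if x = a then b else if x = b then a else x

theorem pvSwF_invol (a b : String) : ∀ x, pvSwF a b (pvSwF a b x) = x := by
  intro x; unfold pvSwF; split_ifs <;> simp_all

theorem pvSwF_inj (a b : String) : Function.Injective (pvSwF a b) :=
  Function.Involutive.injective (pvSwF_invol a b)

theorem part_eq (s : List String) (a b : String) (hs : s.Nodup) (ha : a ∈ s) (hb : b ∈ s) :
    pvApply s (.part a b) = s.map (pvSwF a b) := by
  obtain ⟨u, hu⟩ := Option.isSome_iff_exists.mp ((PySem.List.index?_isSome_iff s a).mpr ha)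
  obtain ⟨v, hv⟩ := Option.isSome_iff_exists.mp ((PySem.List.index?_isSome_iff s b).mpr hb)
  obtain ⟨hult, hua, -⟩ := PySem.List.getElem_of_index?_eq_some hu
  obtain ⟨hvlt, hvb, -⟩ := PySem.List.getElem_of_index?_eq_some hv
  have hsetlen : (s.set v (s.getD u "")).length = s.length := by simp
  simp only [pvApply, hu, hv, Option.getD_some]
  rw [PySem.List.pyGetD_natCast, PySem.List.pyGetD_natCast, PySem.List.pySetD_natCast]
  rw [PySem.List.pySetD_natCast]
  show pvSw s u v = _
  apply List.ext_getElem (by simp)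
  intro k hk hk'
  rw [pvSw_getElem s u v k hult hvlt (by simpa using hk)]
  rw [List.getElem_map]
  by_cases h1 : k = u
  · subst h1
    rw [if_pos rfl, hua]
    simp [pvSwF, hvb]
  · by_cases h2 : k = v
    · subst h2
      rw [if_neg h1, if_pos rfl, hua, hvb]
      by_cases hab : a = b
      · exact absurd ((hs.getElem_inj_iff).mp (by rw [hua, hvb, hab])) h1
      · simp [pvSwF, Ne.symm hab]
    · have hka : s[k]'(by simpa using hk') ≠ a := fun h =>
        h1 ((hs.getElem_inj_iff).mp (by rw [h, hua]))
      have hkb : s[k]'(by simpa using hk') ≠ b := fun h =>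
        h2 ((hs.getElem_inj_iff).mp (by rw [h, hvb]))
      simp [pvSwF, h1, h2, hka, hkb]

theorem pvMap_swF_perm (s : List String) (a b : String) (hs : s.Nodup) (ha : a ∈ s) (hb : b ∈ s) :
    (s.map (pvSwF a b)).Perm s := by
  apply List.perm_iff_count.mpr
  intro c
  have key : List.count c (s.map (pvSwF a b)) = List.count (pvSwF a b c) s := by
    conv_lhs => rw [← pvSwF_invol a b c]
    exact List.count_map_of_injective s _ (pvSwF_inj a b) _
  rw [key]
  by_cases h1 : c = a
  · rw [h1, show pvSwF a b a = b by by_cases hab : a = b <;> simp [pvSwF, hab],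
      List.count_eq_one_of_mem hs hb, List.count_eq_one_of_mem hs ha]
  · by_cases h2 : c = b
    · have hba : b ≠ a := fun h => h1 (h2.trans h)
      rw [h2, show pvSwF a b b = a by simp [pvSwF, hba],
        List.count_eq_one_of_mem hs ha, List.count_eq_one_of_mem hs hb]
    · rw [show pvSwF a b c = c by simp [pvSwF, h1, h2]]

-- ---------- preservation and injectivity ----------

theorem apply_good {s : List String} {op : PvOp} (hv : pvValidOp op) (hs : pvGood s) :
    pvGood (pvApply s op) := by
  cases op with
  | spin k => rw [spin_eq]; exact (pvRot_perm s _).trans hs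
  | exch i j =>
    rw [exch_eq s i j (pvGood_length hs) hv]
    have h16 := pvGood_length hs
    obtain ⟨h1, h2, h3, h4⟩ := hv
    exact (pvSw_perm s _ _ (h16 ▸ pvNormIdx_lt 16 i (by omega) h1 h2)
      (h16 ▸ pvNormIdx_lt 16 j (by omega) h3 h4)).trans hs
  | part a b =>
    rw [part_eq s a b (pvGood_nodup hs) (pvGood_mem hs hv.1) (pvGood_mem hs hv.2)]
    exact (pvMap_swF_perm s a b (pvGood_nodup hs) (pvGood_mem hs hv.1)
      (pvGood_mem hs hv.2)).trans hs

theorem apply_inj {s t : List String} {op : PvOp} (hv : pvValidOp op)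
    (hs : pvGood s) (ht : pvGood t) (h : pvApply s op = pvApply t op) : s = t := by
  cases op with
  | spin k =>
    rw [spin_eq, spin_eq, pvGood_length hs, pvGood_length ht] at h
    exact pvRot_inj s t _ (by rw [pvGood_length hs, pvGood_length ht]) h
  | exch i j =>
    have h16s := pvGood_length hs
    have h16t := pvGood_length ht
    obtain ⟨h1, h2, h3, h4⟩ := hv
    have hu : pvNormIdx 16 i < 16 := pvNormIdx_lt 16 i (by omega) h1 h2
    have hvlt : pvNormIdx 16 j < 16 := pvNormIdx_lt 16 j (by omega) h3 h4
    rw [exch_eq s i j h16s ⟨h1,h2,h3,h4⟩, exch_eq t i j h16t ⟨h1,h2,h3,h4⟩] at h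
    calc s = pvSw (pvSw s (pvNormIdx 16 i) (pvNormIdx 16 j)) (pvNormIdx 16 i) (pvNormIdx 16 j) :=
          (pvSw_pvSw s _ _ (h16s ▸ hu) (h16s ▸ hvlt)).symm
      _ = pvSw (pvSw t (pvNormIdx 16 i) (pvNormIdx 16 j)) (pvNormIdx 16 i) (pvNormIdx 16 j) := by
          rw [h]
      _ = t := pvSw_pvSw t _ _ (h16t ▸ hu) (h16t ▸ hvlt)
  | part a b =>
    rw [part_eq s a b (pvGood_nodup hs) (pvGood_mem hs hv.1) (pvGood_mem hs hv.2),
      part_eq t a b (pvGood_nodup ht) (pvGood_mem ht hv.1) (pvGood_mem ht hv.2)] at h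
    exact List.map_injective_iff.mpr (pvSwF_inj a b) h

theorem dance_good {ops : List PvOp} (hv : ∀ op ∈ ops, pvValidOp op) :
    ∀ {s : List String}, pvGood s → pvGood (ops.foldl pvApply s) := by
  induction ops with
  | nil => intro s hs; exact hs
  | cons op ops ih =>
    intro s hs
    rw [List.foldl_cons]
    exact ih (fun o ho => hv o (List.mem_cons_of_mem _ ho))
      (apply_good (hv op (List.mem_cons_self)) hs)

theorem dance_inj {ops : List PvOp} (hv : ∀ op ∈ ops, pvValidOp op) :
    ∀ {s t : List String}, pvGood s → pvGood t →
      ops.foldl pvApply s = ops.foldl pvApply t → s = t := by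
  induction ops with
  | nil => intro s t _ _ h; exact h
  | cons op ops ih =>
    intro s t hs ht h
    rw [List.foldl_cons, List.foldl_cons] at h
    have hvo := hv op (List.mem_cons_self)
    exact apply_inj hvo hs ht
      (ih (fun o ho => hv o (List.mem_cons_of_mem _ ho)) (apply_good hvo hs) (apply_good hvo ht) h)


-- ---------- the orbit of the start state under one full dance ----------

def pvP (ops : List PvOp) (k : Nat) : List String :=
  (fun s => ops.foldl pvApply s)^[k] pvStart

def pvOrbit (ops : List PvOp) (i : Nat) : List String :=
  (List.range i).map (fun k => PySem.Str.join "" (pvP ops k))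

theorem pvP_zero (ops : List PvOp) : pvP ops 0 = pvStart := rfl

theorem pvP_succ (ops : List PvOp) (k : Nat) :
    pvP ops (k + 1) = ops.foldl pvApply (pvP ops k) :=
  Function.iterate_succ_apply' _ _ _

theorem pvP_good {ops : List PvOp} (hv : ∀ op ∈ ops, pvValidOp op) (k : Nat) :
    pvGood (pvP ops k) := by
  induction k with
  | zero => exact List.Perm.refl _
  | succ k ih => rw [pvP_succ]; exact dance_good hv ih

theorem pvP_cancel {ops : List PvOp} (hv : ∀ op ∈ ops, pvValidOp op) (j : Nat) :
    ∀ a b, pvP ops (a + j) = pvP ops (b + j) → pvP ops a = pvP ops b := by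
  induction j with
  | zero => intro a b h; simpa using h
  | succ j ih =>
    intro a b h
    rw [show a + (j+1) = (a+j) + 1 by omega, show b + (j+1) = (b+j) + 1 by omega,
      pvP_succ, pvP_succ] at h
    exact ih a b (dance_inj hv (pvP_good hv _) (pvP_good hv _) h)

theorem pvReplay_P (ops : List PvOp) (a : Nat) :
    ∀ n, pvReplay ops (pvP ops a) n = pvP ops (a + n) := by
  intro n
  induction n generalizing a with
  | zero => rfl
  | succ n ih =>
    rw [pvReplay, ← pvP_succ, ih (a+1), show a + 1 + n = a + (n+1) by omega]

-- ---------- ''.join is injective on good states ----------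

theorem pvStart_toList : ∀ x ∈ pvStart, ∃ c, x.toList = [c] := by
  intro x hx
  obtain ⟨c, -, rfl⟩ := List.mem_map.mp hx
  exact ⟨c, String.toList_ofList⟩

theorem join_toList_good {s : List String} (hs : pvGood s) :
    (PySem.Str.join "" s).toList = s.map (fun x => x.toList.headD ' ') := by
  have h1 : ∀ x ∈ s, ∃ c, x.toList = [c] := fun x hx => pvStart_toList x (hs.mem_iff.mp hx)
  rw [PySem.Str.toList_join]
  have h2 : s.map String.toList = (s.map (fun x => x.toList.headD ' ')).map (fun c => [c]) := by
    rw [List.map_map]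
    apply List.map_congr_left
    intro x hx
    obtain ⟨c, hc⟩ := h1 x hx
    simp [hc]
  rw [h2]
  simpa using PySem.Chars.join_nil_singletons (s.map (fun x => x.toList.headD ' '))

theorem join_inj {s t : List String} (hs : pvGood s) (ht : pvGood t)
    (h : PySem.Str.join "" s = PySem.Str.join "" t) : s = t := by
  have h' : s.map (fun x => x.toList.headD ' ') = t.map (fun x => x.toList.headD ' ') := by
    rw [← join_toList_good hs, ← join_toList_good ht, h]
  have recover : ∀ u : List String, pvGood u →
      (u.map (fun x => x.toList.headD ' ')).map (fun c => String.ofList [c]) = u := by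
    intro u hu
    rw [List.map_map]
    have : ∀ x ∈ u, String.ofList [x.toList.headD ' '] = x := by
      intro x hx
      obtain ⟨c, hc⟩ := pvStart_toList x (hu.mem_iff.mp hx)
      rw [show [x.toList.headD ' '] = x.toList by simp [hc]]
      exact String.ofList_toList
    calc u.map (fun x => String.ofList [x.toList.headD ' '])
        = u.map id := List.map_congr_left this
      _ = u := List.map_id u
  rw [← recover s hs, ← recover t ht, h']

-- ---------- membership in seen ⟷ return to the start ----------

theorem memb_iff {ops : List PvOp} (hv : ∀ op ∈ ops, pvValidOp op) (i : Nat) (hi : 1 ≤ i)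
    (Hno : ∀ j, 0 < j → j < i → pvP ops j ≠ pvStart) :
    (PySem.Str.join "" (pvP ops i) ∈ pvOrbit ops i) ↔ pvP ops i = pvStart := by
  constructor
  · intro hmem
    obtain ⟨k, hk, heq⟩ := List.mem_map.mp hmem
    have hk' : k < i := List.mem_range.mp hk
    have hPk : pvP ops i = pvP ops k := join_inj (pvP_good hv i) (pvP_good hv k) heq.symm
    by_cases hk0 : k = 0
    · rw [hPk, hk0, pvP_zero]
    · exfalso
      have hc : pvP ops (i - k) = pvP ops 0 := by
        apply pvP_cancel hv k
        rw [Nat.zero_add, show i - k + k = i by omega]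
        exact hPk
      exact Hno (i - k) (by omega) (by omega) (by rw [hc, pvP_zero])
  · intro hP
    apply List.mem_map.mpr
    exact ⟨0, List.mem_range.mpr (by omega), by rw [pvP_zero, hP]⟩

-- ---------- arithmetic / indexing glue ----------

theorem pvMod_natCast (a b : Nat) (_hb : 0 < b) :
    PySem.Int.mod (a : Int) (b : Int) = ((a % b : Nat) : Int) := by
  rw [PySem.Int.mod, Int.fmod_eq_emod]
  simp

theorem orbit_get (ops : List PvOp) (i r : Nat) (hr : r < i) :
    (PySem.List.pyGet? (pvOrbit ops i) ((r : Nat) : Int)).getD ""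
      = PySem.Str.join "" (pvP ops r) := by
  rw [PySem.List.pyGet?_natCast]
  simp [pvOrbit, List.getElem?_map, List.getElem?_range hr]


-- ---------- A's inner loop = B's parsed ops ----------

theorem move_eq (s : List String) (m : String) :
    part2Move s m = (pvParseMove m).foldl pvApply s := by
  unfold part2Move pvParseMove
  by_cases c1 : PySem.Str.pyGet? m 0 = some 's'
  · rw [if_pos c1, if_pos c1]
    simp only [List.foldl_cons, List.foldl_nil, pvApply]
  · rw [if_neg c1, if_neg c1]
    by_cases c2 : PySem.Str.pyGet? m 0 = some 'x'
    · rw [if_pos c2, if_pos c2]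
      generalize (PySem.Str.split? (PySem.Str.slice m (some 1) none) "/").getD [] = ps
      rcases ps with _ | ⟨s1, _ | ⟨s2, _ | t⟩⟩ <;>
        simp only [List.foldl_cons, List.foldl_nil, pvApply]
    · rw [if_neg c2, if_neg c2]
      by_cases c3 : PySem.Str.pyGet? m 0 = some 'p'
      · rw [if_pos c3, if_pos c3]
        generalize (PySem.Str.split? (PySem.Str.slice m (some 1) none) "/").getD [] = ps
        rcases ps with _ | ⟨s1, _ | ⟨s2, _ | t⟩⟩ <;>
          simp only [List.foldl_cons, List.foldl_nil, pvApply]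
      · rw [if_neg c3, if_neg c3]
        rfl

theorem danceAll_eq (data : List String) (s : List String) :
    data.foldl part2Move s = (pvParse data).foldl pvApply s := by
  rw [pvParse, PySem.List.foldl_append_eq_flatMap, List.nil_append]
  induction data generalizing s with
  | nil => rfl
  | cons m d ih =>
    rw [List.foldl_cons, List.flatMap_cons, List.foldl_append, move_eq, ih]

theorem parse_valid (data : List String) (hpre : Pre_part2 data) :
    ∀ op ∈ pvParse data, pvValidOp op := by
  intro op hop
  rw [pvParse, PySem.List.foldl_append_eq_flatMap, List.nil_append] at hop
  obtain ⟨m, hm, hin⟩ := List.mem_flatMap.mp hop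
  have hval := hpre m hm
  unfold pvValidMove at hval
  unfold pvParseMove at hin
  rcases hc : PySem.Str.pyGet? m 0 with _ | c
  · simp only [hc] at hval
    exact absurd hval (by simp)
  simp only [hc] at hval hin
  simp only [Option.some.injEq] at hin
  by_cases c1 : c = 's'
  · rw [if_pos c1] at hin
    rw [List.mem_singleton] at hin
    subst hin
    trivial
  · rw [if_neg c1] at hval hin
    by_cases c2 : c = 'x'
    · rw [if_pos c2] at hval hin
      rcases hps : (PySem.Str.split? (PySem.Str.slice m (some 1) none) "/").getD [] with
          _ | ⟨s1, _ | ⟨s2, _ | t⟩⟩ <;> simp only [hps] at hval hin <;>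
        try exact absurd hval Bool.false_ne_true
      rcases h1 : PySem.Int.ofStr? s1 with _ | k1 <;>
        rcases h2 : PySem.Int.ofStr? s2 with _ | k2 <;>
        simp only [h1, h2] at hval hin <;>
        try exact absurd hval Bool.false_ne_true
      rw [List.mem_singleton] at hin
      subst hin
      simp only [Option.getD_some]
      show -16 ≤ k1 ∧ k1 < 16 ∧ -16 ≤ k2 ∧ k2 < 16
      exact of_decide_eq_true hval
    · rw [if_neg c2] at hval hin
      by_cases c3 : c = 'p'
      · rw [if_pos c3] at hval hin
        rcases hps : (PySem.Str.split? (PySem.Str.slice m (some 1) none) "/").getD [] with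
            _ | ⟨s1, _ | ⟨s2, _ | t⟩⟩ <;> simp only [hps] at hval hin <;>
          try exact absurd hval Bool.false_ne_true
        rw [List.mem_singleton] at hin
        subst hin
        rw [Bool.and_eq_true] at hval
        exact ⟨List.contains_iff_mem.mp hval.1, List.contains_iff_mem.mp hval.2⟩
      · rw [if_neg c3] at hin
        exact absurd hin (by simp)


-- ---------- the two loops, synchronized ----------

theorem sync (ops : List PvOp) (data : List String)
    (hv : ∀ op ∈ ops, pvValidOp op)
    (hd : ∀ s, data.foldl part2Move s = ops.foldl pvApply s) :
    ∀ fuel i, 1 ≤ i → i + fuel = 1000000000 →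
      (∀ j, 0 < j → j < i → pvP ops j ≠ pvStart) →
      part2Go data (pvP ops i) (pvOrbit ops i) i fuel
        = part2AltGo ops pvStart (pvP ops (i-1)) i (fuel+1) := by
  intro fuel
  induction fuel with
  | zero =>
    intro i hi hsum Hno
    have hstep : ops.foldl pvApply (pvP ops (i-1)) = pvP ops i := by
      conv_rhs => rw [show i = (i-1)+1 by omega]
      rw [pvP_succ]
    rw [part2Go, part2AltGo]
    simp only [hstep]
    by_cases hP : pvP ops i = pvStart
    · rw [if_pos hP]
      rw [show i = 1000000000 by omega, Nat.mod_self, pvReplay]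
    · rw [if_neg hP, part2AltGo]
  | succ fuel ih =>
    intro i hi hsum Hno
    have hstep : ops.foldl pvApply (pvP ops (i-1)) = pvP ops i := by
      conv_rhs => rw [show i = (i-1)+1 by omega]
      rw [pvP_succ]
    rw [part2Go, part2AltGo]
    simp only [hstep]
    have hmemb := memb_iff hv i hi Hno
    by_cases hP : pvP ops i = pvStart
    · rw [if_pos (hmemb.mpr hP), if_pos hP]
      rw [show (1000000000 : Int) = ((1000000000 : Nat) : Int) by norm_num,
        pvMod_natCast 1000000000 i (by omega),
        orbit_get ops i _ (Nat.mod_lt _ (by omega))]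
      rw [hP, show pvStart = pvP ops 0 from rfl, pvReplay_P, Nat.zero_add]
    · rw [if_neg (fun hmem => hP (hmemb.mp hmem)), if_neg hP]
      have h1 : data.foldl part2Move (pvP ops i) = pvP ops (i+1) := by
        rw [hd, ← pvP_succ]
      have h2 : pvOrbit ops i ++ [PySem.Str.join "" (pvP ops i)] = pvOrbit ops (i+1) := by
        simp [pvOrbit, List.range_succ]
      rw [h1, h2]
      have Hno' : ∀ j, 0 < j → j < i + 1 → pvP ops j ≠ pvStart := by
        intro j hj hji
        by_cases hje : j = i
        · rw [hje]; exact hP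
        · exact Hno j hj (by omega)
      have := ih (i+1) (by omega) (by omega) Hno'
      rw [show i + 1 - 1 = i by omega] at this
      exact this

-- ===== VERDICT (by name: the statement is the Claim_ definition above) =====
theorem part2_spec : Claim_equal_part2 := by
  unfold Claim_equal_part2 Spec_part2
  intro data _hdom hpre
  have hv := parse_valid data hpre
  have hd : ∀ s, data.foldl part2Move s = (pvParse data).foldl pvApply s :=
    fun s => danceAll_eq data s
  show part2 data = part2_alt data
  rw [part2, part2_alt]
  rw [show (1000000000 : Nat) = 999999999 + 1 by norm_num]
  rw [part2Go, if_neg (List.not_mem_nil)]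
  have h1 : data.foldl part2Move pvStart = pvP (pvParse data) 1 := by
    rw [hd, show pvStart = pvP (pvParse data) 0 from rfl]
    exact (pvP_succ _ 0).symm
  have h2 : ([] : List String) ++ [PySem.Str.join "" pvStart] = pvOrbit (pvParse data) 1 := by
    simp [pvOrbit, pvP_zero]
  rw [h1]
  rw [show ([] : List String) ++ [PySem.Str.join "" pvStart] = pvOrbit (pvParse data) 1 from h2]
  have hs := sync (pvParse data) data hv hd 999999999 1 (by omega) (by omega)
    (by intro j hj hji; omega)
  rw [hs, pvP_zero]
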